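-- pv_equiv track=rewrite | github.com/BeatrizBL/Adventofcode_2022 | 21_Monkey_Math/monkey_math.py | build_equality
-- ===== SOURCE A (Python) =====
-- def build_expression(monkeys: dict, start: str = 'root') -> str:
--     if monkeys[start].isdigit():
--         return monkeys[start]
--     else:
--         parts = monkeys[start].split(' ')
--         m1 = parts[0].strip()
--         op = parts[1].strip()
--         m2 = parts[2].strip()
--         return f'({build_expression(monkeys, m1)} {op} {build_expression(monkeys, m2)})'
--
-- def build_equality(
--     monkeys: dict,
--     start: str = 'root',
--     variable: str = 'humn',
--     id_value: float = '1000' # Number that is not in the input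
-- ) -> str:
--     monkeys_adj = monkeys.copy()
--     monkeys_adj[variable] = id_value
--     parts = monkeys[start].split(' ')
--     eqs = []
--     for i in [0,-1]:
--         p = parts[i].strip()
--         eq = build_expression(monkeys=monkeys_adj, start=p)
--         eq = eq.replace(id_value, 'x')
--         eqs.append(eq)
--     eq = f'({eqs[0]}) - ({eqs[1]})'
--     return eq
-- ===== SOURCE B (Python) =====
-- def build_equality(
--     monkeys: dict,
--     start: str = 'root',
--     variable: str = 'humn',
--     id_value: float = '1000'
-- ) -> str:
--     # Iterative fixpoint instead of recursion: sweep the map in rounds, resolving every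
--     # monkey whose operands are already resolved, until nothing changes; then the two
--     # top-level expressions are plain table lookups.
--     adj = dict(monkeys)
--     adj[variable] = id_value
--     resolved = {}
--     pending = list(adj.items())
--     while pending:
--         remaining = []
--         for name, value in pending:
--             if value.isdigit():
--                 resolved[name] = value
--                 continue
--             parts = value.split(' ')
--             if len(parts) >= 3 and parts[0].strip() in resolved and parts[2].strip() in resolved:
--                 resolved[name] = f'({resolved[parts[0].strip()]} {parts[1].strip()} {resolved[parts[2].strip()]})'
--             else:
--                 remaining.append((name, value))
--         if len(remaining) == len(pending):
--             break
--         pending = remaining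
--     parts = monkeys[start].split(' ')
--     left = resolved[parts[0].strip()].replace(id_value, 'x')
--     right = resolved[parts[-1].strip()].replace(id_value, 'x')
--     return f'({left}) - ({right})'
-- ===== Notes on version B (the rewrite author's own statement) =====
-- stated objective: alternative
-- what changed: The recursive build_expression tree walk is replaced by an iterative fixpoint: repeated sweeps over the monkey map resolve each monkey whose operands are already resolved into a string table, so the two top-level expressions become plain table lookups.
import Mathlib
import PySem

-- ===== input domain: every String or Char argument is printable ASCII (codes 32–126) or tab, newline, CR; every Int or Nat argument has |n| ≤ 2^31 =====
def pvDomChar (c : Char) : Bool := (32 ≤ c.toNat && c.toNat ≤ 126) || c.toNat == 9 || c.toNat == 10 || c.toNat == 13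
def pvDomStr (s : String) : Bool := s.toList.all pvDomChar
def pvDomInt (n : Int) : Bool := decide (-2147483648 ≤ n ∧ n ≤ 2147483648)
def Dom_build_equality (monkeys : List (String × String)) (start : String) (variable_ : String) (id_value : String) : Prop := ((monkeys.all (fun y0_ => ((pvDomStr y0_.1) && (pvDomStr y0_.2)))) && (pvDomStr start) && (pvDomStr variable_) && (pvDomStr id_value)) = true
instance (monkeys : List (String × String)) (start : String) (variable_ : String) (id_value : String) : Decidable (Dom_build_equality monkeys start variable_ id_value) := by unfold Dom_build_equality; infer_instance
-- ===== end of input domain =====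

-- B replaces the per-node recursive build_expression by an iterative fixpoint: repeated
-- sweeps over the monkey map resolve every monkey whose operands are already resolved,
-- so the two top-level expressions become plain table lookups (a different decomposition).

-- shared primitive: Python's v.split(' '); split? is some for a nonempty separator, the getD never fires
def pvSplit (s : String) : List String := (PySem.Str.split? s " ").getD []

-- ===== PORT A =====
-- build_expression, fuel-totalized (none = KeyError/IndexError or fuel exhausted; under
-- Pre_ the fuel monkeys_adj.size + 1 is proved sufficient)
def pvBuildExpr (d : PySem.Dict String String) : Nat → String → Option String
  | 0, _ => none
  | fuel + 1, start =>
    match d.get? start with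
    | none => none
    | some v =>
      if PySem.Str.strIsdigit v then some v
      else
        let parts := pvSplit v
        match PySem.List.pyGet? parts 0, PySem.List.pyGet? parts 1, PySem.List.pyGet? parts 2 with
        | some a, some o, some b =>
          match pvBuildExpr d fuel (PySem.Str.strip a), pvBuildExpr d fuel (PySem.Str.strip b) with
          | some e1, some e2 => some ("(" ++ e1 ++ " " ++ PySem.Str.strip o ++ " " ++ e2 ++ ")")
          | _, _ => none
        | _, _, _ => none

-- the loop 'for i in [0, -1]' is unrolled into its two iterations
def build_equality (monkeys : List (String × String)) (start : String) (variable_ : String) (id_value : String) : String :=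
  let monkeys_adj := (PySem.Dict.mk monkeys).insert variable_ id_value
  let parts := pvSplit ((PySem.Dict.mk monkeys).getD start "")
  let p0 := PySem.Str.strip (PySem.List.pyGetD parts 0 "")
  let p1 := PySem.Str.strip (PySem.List.pyGetD parts (-1) "")
  let eq0 := match pvBuildExpr monkeys_adj (monkeys_adj.size + 1) p0 with
    | some e => PySem.Str.replace e id_value "x"
    | none => ""
  let eq1 := match pvBuildExpr monkeys_adj (monkeys_adj.size + 1) p1 with
    | some e => PySem.Str.replace e id_value "x"
    | none => ""
  "(" ++ eq0 ++ ") - (" ++ eq1 ++ ")"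

-- ===== PORT B =====
-- one entry of the inner 'for name, value in pending' sweep; acc = (resolved, remaining)
def pvRoundStep (acc : PySem.Dict String String × List (String × String)) (e : String × String) :
    PySem.Dict String String × List (String × String) :=
  if PySem.Str.strIsdigit e.2 then (acc.1.insert e.1 e.2, acc.2)
  else
    let parts := pvSplit e.2
    let m1 := PySem.Str.strip (PySem.List.pyGetD parts 0 "")
    let m2 := PySem.Str.strip (PySem.List.pyGetD parts 2 "")
    if 3 ≤ parts.length ∧ acc.1.contains m1 = true ∧ acc.1.contains m2 = true then
      (acc.1.insert e.1 ("(" ++ acc.1.getD m1 "" ++ " " ++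
        PySem.Str.strip (PySem.List.pyGetD parts 1 "") ++ " " ++ acc.1.getD m2 "" ++ ")"), acc.2)
    else
      (acc.1, acc.2 ++ [e])

-- the 'while pending' loop; the fuel pending.length + 1 can never run out because each
-- recursive call strictly shrinks pending (the no-progress case breaks instead)
def pvLoop : Nat → PySem.Dict String String → List (String × String) → PySem.Dict String String
  | 0, res, _ => res
  | fuel + 1, res, pending =>
    if pending.isEmpty then res
    else
      let out := pending.foldl pvRoundStep (res, [])
      if out.2.length = pending.length then out.1
      else pvLoop fuel out.1 out.2

def build_equality_alt (monkeys : List (String × String)) (start : String) (variable_ : String) (id_value : String) : String :=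
  let adj := (PySem.Dict.mk monkeys).insert variable_ id_value
  let resolved := pvLoop (adj.items.length + 1) PySem.Dict.empty adj.items
  let parts := pvSplit ((PySem.Dict.mk monkeys).getD start "")
  let left := PySem.Str.replace (resolved.getD (PySem.Str.strip (PySem.List.pyGetD parts 0 "")) "") id_value "x"
  let right := PySem.Str.replace (resolved.getD (PySem.Str.strip (PySem.List.pyGetD parts (-1) "")) "") id_value "x"
  "(" ++ left ++ ") - (" ++ right ++ ")"

-- ===== PRECONDITION & SPEC =====
-- pvS items j = the names resolvable within j rounds: the j-fold iteration of the
-- 'defined directly, or from two already-resolvable operands' operator — a shape condition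
-- on the input's dependency graph (its well-founded part), not a run of either program.
def pvS (items : List (String × String)) : Nat → List String
  | 0 => []
  | j + 1 =>
    (items.filter (fun kv => decide (PySem.Str.strIsdigit kv.2 = true ∨
        (3 ≤ (pvSplit kv.2).length ∧
         PySem.Str.strip (PySem.List.pyGetD (pvSplit kv.2) 0 "") ∈ pvS items j ∧
         PySem.Str.strip (PySem.List.pyGetD (pvSplit kv.2) 2 "") ∈ pvS items j)))).map Prod.fst

-- Pre_ = exactly the inputs where A returns: start is a key, the keys are distinct
-- (a Python dict cannot have duplicate keys), and both top-level operand names have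
-- well-founded definitions (anything else makes A raise KeyError/IndexError or recurse forever).
def Pre_build_equality (monkeys : List (String × String)) (start : String) (variable_ : String) (id_value : String) : Prop :=
  let adj := (PySem.Dict.mk monkeys).insert variable_ id_value
  (monkeys.map Prod.fst).Nodup ∧
  start ∈ monkeys.map Prod.fst ∧
  PySem.Str.strip (PySem.List.pyGetD (pvSplit ((PySem.Dict.mk monkeys).getD start "")) 0 "") ∈ pvS adj.items adj.items.length ∧
  PySem.Str.strip (PySem.List.pyGetD (pvSplit ((PySem.Dict.mk monkeys).getD start "")) (-1) "") ∈ pvS adj.items adj.items.length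
instance (monkeys : List (String × String)) (start : String) (variable_ : String) (id_value : String) : Decidable (Pre_build_equality monkeys start variable_ id_value) := by unfold Pre_build_equality; infer_instance

def pvWitness_build_equality : (List (String × String)) × String × String × String :=
  ([("root", "a + b"), ("a", "1"), ("b", "humn * c"), ("humn", "5"), ("c", "2")], "root", "humn", "1000")

def Spec_build_equality (monkeys : List (String × String)) (start : String) (variable_ : String) (id_value : String) (out : String) : Prop := out = build_equality_alt monkeys start variable_ id_value
instance (monkeys : List (String × String)) (start : String) (variable_ : String) (id_value : String) (out : String) : Decidable (Spec_build_equality monkeys start variable_ id_value out) := by unfold Spec_build_equality; infer_instance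

-- ===== CLAIM (what is proved, stated in full; the proofs are below) =====
def Claim_equal_build_equality : Prop := ∀ (monkeys : List (String × String)) (start : String) (variable_ : String) (id_value : String), Dom_build_equality monkeys start variable_ id_value → Pre_build_equality monkeys start variable_ id_value → Spec_build_equality monkeys start variable_ id_value (build_equality monkeys start variable_ id_value)

-- ===== LEMMAS AND PROOFS =====

theorem pvGetN (xs : List String) (k : Nat) (hk : k < xs.length) :
    PySem.List.pyGet? xs (k : Int) = some (PySem.List.pyGetD xs (k : Int) "") := by
  rw [PySem.List.pyGet?_natCast, PySem.List.pyGetD_natCast,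
      List.getElem?_eq_getElem hk, List.getD_eq_getElem _ _ hk]

theorem pvBuildExpr_mono (d : PySem.Dict String String) :
    ∀ {n m : Nat} {s r : String}, pvBuildExpr d n s = some r → n ≤ m → pvBuildExpr d m s = some r := by
  intro n
  induction n with
  | zero => intro m s r h _; simp [pvBuildExpr] at h
  | succ n ih =>
    intro m s r h hle
    obtain ⟨m, rfl⟩ : ∃ m', m = m' + 1 := ⟨m - 1, by omega⟩
    rw [pvBuildExpr] at h ⊢
    cases hg : d.get? s with
    | none => rw [hg] at h; simp at h
    | some v =>
      rw [hg] at h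
      dsimp only at h ⊢
      by_cases hd : PySem.Str.strIsdigit v = true
      · rw [if_pos hd] at h ⊢; exact h
      · rw [if_neg hd] at h ⊢
        cases h0 : PySem.List.pyGet? (pvSplit v) 0 with
        | none => rw [h0] at h; simp at h
        | some a =>
          rw [h0] at h
          cases h1 : PySem.List.pyGet? (pvSplit v) 1 with
          | none => rw [h1] at h; simp at h
          | some o =>
            rw [h1] at h
            cases h2 : PySem.List.pyGet? (pvSplit v) 2 with
            | none => rw [h2] at h; simp at h
            | some b =>
              rw [h2] at h
              dsimp only at h ⊢
              cases ha : pvBuildExpr d n (PySem.Str.strip a) with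
              | none => rw [ha] at h; simp at h
              | some e1 =>
                rw [ha] at h
                cases hb : pvBuildExpr d n (PySem.Str.strip b) with
                | none => rw [hb] at h; simp at h
                | some e2 =>
                  rw [hb] at h
                  rw [ih ha (by omega), ih hb (by omega)]
                  exact h

theorem pvBuildExpr_det (d : PySem.Dict String String) {n m : Nat} {s w w' : String}
    (h1 : pvBuildExpr d n s = some w) (h2 : pvBuildExpr d m s = some w') : w = w' := by
  have a1 := pvBuildExpr_mono d h1 (Nat.le_max_left n m)
  have a2 := pvBuildExpr_mono d h2 (Nat.le_max_right n m)
  rw [a1] at a2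
  exact Option.some.inj a2

-- the resolved table is sound: every entry is the value the recursive build_expression computes
def pvInvD (adj res : PySem.Dict String String) : Prop :=
  ∀ k w, res.get? k = some w → ∃ j, pvBuildExpr adj j k = some w

theorem pvPairEq (adj : PySem.Dict String String) (hnd : adj.keys.Nodup) {k v v' : String}
    (h1 : (k, v) ∈ adj.items) (h2 : (k, v') ∈ adj.items) : v = v' := by
  have g1 := PySem.Dict.get?_of_mem_items adj h1 hnd
  have g2 := PySem.Dict.get?_of_mem_items adj h2 hnd
  rw [g1] at g2
  exact Option.some.injEq _ _ ▸ g2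

-- one step of pvBuildExpr for a well-formed non-digit entry, from its two operand values
theorem pvBuildExpr_node (adj : PySem.Dict String String) {e : String × String}
    (hget : adj.get? e.1 = some e.2) (hd : ¬ PySem.Str.strIsdigit e.2 = true)
    (hlen : 3 ≤ (pvSplit e.2).length) {j1 j2 : Nat} {w1 w2 : String}
    (h1 : pvBuildExpr adj j1 (PySem.Str.strip (PySem.List.pyGetD (pvSplit e.2) 0 "")) = some w1)
    (h2 : pvBuildExpr adj j2 (PySem.Str.strip (PySem.List.pyGetD (pvSplit e.2) 2 "")) = some w2) :
    pvBuildExpr adj (max j1 j2 + 1) e.1 =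
      some ("(" ++ w1 ++ " " ++ PySem.Str.strip (PySem.List.pyGetD (pvSplit e.2) 1 "") ++ " " ++ w2 ++ ")") := by
  rw [pvBuildExpr, hget]
  dsimp only
  rw [if_neg hd]
  have hg0 : PySem.List.pyGet? (pvSplit e.2) 0 = some (PySem.List.pyGetD (pvSplit e.2) 0 "") := by
    exact_mod_cast pvGetN (pvSplit e.2) 0 (by omega)
  have hg1 : PySem.List.pyGet? (pvSplit e.2) 1 = some (PySem.List.pyGetD (pvSplit e.2) 1 "") := by
    exact_mod_cast pvGetN (pvSplit e.2) 1 (by omega)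
  have hg2 : PySem.List.pyGet? (pvSplit e.2) 2 = some (PySem.List.pyGetD (pvSplit e.2) 2 "") := by
    exact_mod_cast pvGetN (pvSplit e.2) 2 (by omega)
  simp only [hg0, hg1, hg2]
  rw [pvBuildExpr_mono adj h1 (Nat.le_max_left j1 j2), pvBuildExpr_mono adj h2 (Nat.le_max_right j1 j2)]

-- names in pvS are resolvable by the recursion with that much fuel
theorem pvS_sound (adj : PySem.Dict String String) (hnd : adj.keys.Nodup) :
    ∀ (j : Nat) (k : String), k ∈ pvS adj.items j → ∃ w, pvBuildExpr adj j k = some w := by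
  intro j
  induction j with
  | zero => intro k hk; simp [pvS] at hk
  | succ j ih =>
    intro k hk
    rw [pvS] at hk
    obtain ⟨e, he, hek⟩ := List.mem_map.mp hk
    obtain ⟨hei, hgood⟩ := List.mem_filter.mp he
    have hget : adj.get? e.1 = some e.2 := PySem.Dict.get?_of_mem_items adj (by
      cases e; exact hei) hnd
    rcases of_decide_eq_true hgood with hd | ⟨hlen, h1, h2⟩
    · exact hek ▸ ⟨e.2, by rw [pvBuildExpr, hget]; dsimp only; rw [if_pos hd]⟩
    · obtain ⟨w1, hw1⟩ := ih _ h1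
      obtain ⟨w2, hw2⟩ := ih _ h2
      by_cases hd : PySem.Str.strIsdigit e.2 = true
      · exact hek ▸ ⟨e.2, by rw [pvBuildExpr, hget]; dsimp only; rw [if_pos hd]⟩
      · have hnode := pvBuildExpr_node adj hget hd hlen hw1 hw2
        rw [show max j j + 1 = j + 1 from by omega] at hnode
        exact hek ▸ ⟨_, hnode⟩

theorem pvS_subset_keys (items : List (String × String)) (j : Nat) (k : String)
    (hk : k ∈ pvS items j) : k ∈ items.map Prod.fst := by
  cases j with
  | zero => simp [pvS] at hk
  | succ j =>
    rw [pvS] at hk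
    obtain ⟨e, he, hek⟩ := List.mem_map.mp hk
    exact hek ▸ List.mem_map.mpr ⟨e, (List.mem_filter.mp he).1, rfl⟩

-- branch lemmas for pvRoundStep
theorem pvRoundStep_digit (acc : PySem.Dict String String × List (String × String))
    (e : String × String) (h : PySem.Str.strIsdigit e.2 = true) :
    pvRoundStep acc e = (acc.1.insert e.1 e.2, acc.2) := by
  unfold pvRoundStep; rw [if_pos h]

theorem pvRoundStep_resolve (acc : PySem.Dict String String × List (String × String))
    (e : String × String) (hd : ¬ PySem.Str.strIsdigit e.2 = true)
    (hc : 3 ≤ (pvSplit e.2).length ∧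
      acc.1.contains (PySem.Str.strip (PySem.List.pyGetD (pvSplit e.2) 0 "")) = true ∧
      acc.1.contains (PySem.Str.strip (PySem.List.pyGetD (pvSplit e.2) 2 "")) = true) :
    pvRoundStep acc e = (acc.1.insert e.1 ("(" ++
      acc.1.getD (PySem.Str.strip (PySem.List.pyGetD (pvSplit e.2) 0 "")) "" ++ " " ++
      PySem.Str.strip (PySem.List.pyGetD (pvSplit e.2) 1 "") ++ " " ++
      acc.1.getD (PySem.Str.strip (PySem.List.pyGetD (pvSplit e.2) 2 "")) "" ++ ")"), acc.2) := by
  unfold pvRoundStep; rw [if_neg hd, if_pos hc]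

theorem pvRoundStep_stuck (acc : PySem.Dict String String × List (String × String))
    (e : String × String) (hd : ¬ PySem.Str.strIsdigit e.2 = true)
    (hc : ¬ (3 ≤ (pvSplit e.2).length ∧
      acc.1.contains (PySem.Str.strip (PySem.List.pyGetD (pvSplit e.2) 0 "")) = true ∧
      acc.1.contains (PySem.Str.strip (PySem.List.pyGetD (pvSplit e.2) 2 "")) = true)) :
    pvRoundStep acc e = (acc.1, acc.2 ++ [e]) := by
  unfold pvRoundStep; rw [if_neg hd, if_neg hc]

-- 'this entry can be resolved against table res' (digit, or both operands present)
def pvGoodP (res : PySem.Dict String String) (e : String × String) : Prop :=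
  PySem.Str.strIsdigit e.2 = true ∨
    (3 ≤ (pvSplit e.2).length ∧
     res.contains (PySem.Str.strip (PySem.List.pyGetD (pvSplit e.2) 0 "")) = true ∧
     res.contains (PySem.Str.strip (PySem.List.pyGetD (pvSplit e.2) 2 "")) = true)

theorem pvGoodP_mono {res res' : PySem.Dict String String}
    (h : ∀ k, res.contains k = true → res'.contains k = true) (e : String × String)
    (hg : pvGoodP res e) : pvGoodP res' e := by
  rcases hg with hd | ⟨hlen, h1, h2⟩
  · exact Or.inl hd
  · exact Or.inr ⟨hlen, h _ h1, h _ h2⟩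

theorem pvContains_of_get? {res : PySem.Dict String String} {k : String}
    (h : res.contains k = true) : ∃ w, res.get? k = some w := by
  rw [PySem.Dict.contains_eq_isSome_get?] at h
  exact Option.isSome_iff_exists.mp h

-- each sweep entry either resolves (inserting a provably-correct value) or is carried over
theorem pvStep_cases (adj : PySem.Dict String String) (hnd : adj.keys.Nodup)
    (res : PySem.Dict String String) (racc : List (String × String)) (e : String × String)
    (hei : e ∈ adj.items) (hinv : pvInvD adj res) :
    (∃ w, pvRoundStep (res, racc) e = (res.insert e.1 w, racc) ∧ ∃ j, pvBuildExpr adj j e.1 = some w)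
    ∨ (pvRoundStep (res, racc) e = (res, racc ++ [e]) ∧ ¬ pvGoodP res e) := by
  have hgete : adj.get? e.1 = some e.2 := PySem.Dict.get?_of_mem_items adj (by cases e; exact hei) hnd
  by_cases hd : PySem.Str.strIsdigit e.2 = true
  · refine Or.inl ⟨e.2, pvRoundStep_digit _ _ hd, 1, ?_⟩
    rw [pvBuildExpr, hgete]
    dsimp only
    rw [if_pos hd]
  · by_cases hc : 3 ≤ (pvSplit e.2).length ∧
        res.contains (PySem.Str.strip (PySem.List.pyGetD (pvSplit e.2) 0 "")) = true ∧
        res.contains (PySem.Str.strip (PySem.List.pyGetD (pvSplit e.2) 2 "")) = true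
    · obtain ⟨hlen, hc1, hc2⟩ := hc
      obtain ⟨w1, hw1⟩ := pvContains_of_get? hc1
      obtain ⟨w2, hw2⟩ := pvContains_of_get? hc2
      obtain ⟨j1, hj1⟩ := hinv _ _ hw1
      obtain ⟨j2, hj2⟩ := hinv _ _ hw2
      refine Or.inl ⟨_, pvRoundStep_resolve _ _ hd ⟨hlen, hc1, hc2⟩, max j1 j2 + 1, ?_⟩
      rw [PySem.Dict.getD_of_get?_eq_some _ _ hw1, PySem.Dict.getD_of_get?_eq_some _ _ hw2]
      exact pvBuildExpr_node adj hgete hd hlen hj1 hj2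
    · refine Or.inr ⟨pvRoundStep_stuck _ _ hd hc, ?_⟩
      intro hg
      rcases hg with hg | hg
      · exact hd hg
      · exact hc hg

-- the inner sweep: everything the loop needs about one round, in one induction over pending
theorem pvRound_spec (adj : PySem.Dict String String) (hnd : adj.keys.Nodup) :
    ∀ (pending : List (String × String)) (res : PySem.Dict String String)
      (racc : List (String × String)),
    (∀ e ∈ pending, e ∈ adj.items) →
    ((racc.map Prod.fst ++ pending.map Prod.fst).Nodup) →
    (∀ e ∈ racc, res.contains e.1 = false) →
    (∀ e ∈ pending, res.contains e.1 = false) →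
    pvInvD adj res →
    res.keys.Nodup →
    (pvInvD adj (pending.foldl pvRoundStep (res, racc)).1 ∧
     (pending.foldl pvRoundStep (res, racc)).1.keys.Nodup ∧
     (∀ k, res.contains k = true → (pending.foldl pvRoundStep (res, racc)).1.contains k = true) ∧
     (∀ e ∈ (pending.foldl pvRoundStep (res, racc)).2, e ∈ racc ∨ e ∈ pending) ∧
     (List.Sublist ((pending.foldl pvRoundStep (res, racc)).2.map Prod.fst) (racc.map Prod.fst ++ pending.map Prod.fst)) ∧
     (∃ rem', (pending.foldl pvRoundStep (res, racc)).2 = racc ++ rem') ∧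
     ((pending.foldl pvRoundStep (res, racc)).2.length ≤ racc.length + pending.length) ∧
     ((pending.foldl pvRoundStep (res, racc)).2.length = racc.length + pending.length →
        (pending.foldl pvRoundStep (res, racc)).1 = res ∧
        (pending.foldl pvRoundStep (res, racc)).2 = racc ++ pending) ∧
     (∀ e ∈ pending, (pending.foldl pvRoundStep (res, racc)).1.contains e.1 = true ∨
        e ∈ (pending.foldl pvRoundStep (res, racc)).2) ∧
     (∀ e ∈ pending, pvGoodP res e → (pending.foldl pvRoundStep (res, racc)).1.contains e.1 = true) ∧
     (∀ e ∈ (pending.foldl pvRoundStep (res, racc)).2,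
        (pending.foldl pvRoundStep (res, racc)).1.contains e.1 = false)) := by
  intro pending
  induction pending with
  | nil =>
    intro res racc _ _ hfr _ hinv hndk
    refine ⟨hinv, hndk, fun k h => h, fun e he => Or.inl he, by simpa using List.Sublist.refl _,
      ⟨[], by simp⟩, by simp, fun _ => ⟨rfl, by simp⟩, by simp, by simp, fun e he => hfr e he⟩
  | cons e rest ih =>
    intro res racc hpend hnod hfracc hfpend hinv hndk
    have hei : e ∈ adj.items := hpend e List.mem_cons_self
    have hfe : res.contains e.1 = false := hfpend e List.mem_cons_self
    have hnotracc : e.1 ∉ racc.map Prod.fst := by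
      intro hm
      have hdisj := (List.nodup_append.mp hnod).2.2
      exact hdisj e.1 hm e.1 (by simp) rfl
    have hnotrest : e.1 ∉ rest.map Prod.fst := by
      have h2 := (List.nodup_append.mp hnod).2.1
      rw [List.map_cons, List.nodup_cons] at h2
      exact h2.1
    have hnod' : (racc.map Prod.fst ++ rest.map Prod.fst).Nodup := by
      refine List.Nodup.sublist ?_ hnod
      rw [List.map_cons]
      exact (List.sublist_cons_self e.1 (rest.map Prod.fst)).append_left _
    rcases pvStep_cases adj hnd res racc e hei hinv with ⟨w, hstep, j, hj⟩ | ⟨hstep, hbad⟩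
    · -- e resolves: the accumulator becomes (res.insert e.1 w, racc)
      rw [List.foldl_cons, hstep]
      have hins : ∀ k, res.contains k = true → (res.insert e.1 w).contains k = true := by
        intro k hk; rw [PySem.Dict.contains_insert]; simp [hk]
      have hIH := ih (res.insert e.1 w) racc
        (fun x hx => hpend x (List.mem_cons_of_mem _ hx))
        hnod'
        (fun x hx => by
          rw [PySem.Dict.contains_insert]
          exact Bool.or_eq_false_iff.mpr ⟨beq_eq_false_iff_ne.mpr
            (fun hxe => hnotracc (hxe ▸ List.mem_map.mpr ⟨x, hx, rfl⟩)), hfracc x hx⟩)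
        (fun x hx => by
          rw [PySem.Dict.contains_insert]
          exact Bool.or_eq_false_iff.mpr ⟨beq_eq_false_iff_ne.mpr
            (fun hxe => hnotrest (hxe ▸ List.mem_map.mpr ⟨x, hx, rfl⟩)),
            hfpend x (List.mem_cons_of_mem _ hx)⟩)
        (by
          intro k w' hk
          rw [PySem.Dict.get?_insert] at hk
          split_ifs at hk with hke
          · exact ⟨j, hke ▸ (by injection hk with h; rw [h] at hj; exact hj)⟩
          · exact hinv k w' hk)
        (PySem.Dict.nodup_keys_insert _ _ _ hndk)
      obtain ⟨c1, c2, c3, c4, c5, c6, c7, c8, c9, c10, c11⟩ := hIH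
      have hcontE : (rest.foldl pvRoundStep (res.insert e.1 w, racc)).1.contains e.1 = true :=
        c3 e.1 (by rw [PySem.Dict.contains_insert]; simp)
      refine ⟨c1, c2, fun k hk => c3 k (hins k hk),
        fun x hx => (c4 x hx).imp id (List.mem_cons_of_mem _), ?_, c6,
        by simpa using Nat.le_succ_of_le c7, ?_, ?_, ?_, c11⟩
      · refine c5.trans ?_
        rw [List.map_cons]
        exact (List.sublist_cons_self e.1 (rest.map Prod.fst)).append_left _
      · intro hlen
        exfalso
        have := c7
        simp only [List.length_cons] at hlen
        omega
      · intro x hx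
        rcases List.mem_cons.mp hx with rfl | hxr
        · exact Or.inl hcontE
        · exact c9 x hxr
      · intro x hx hg
        rcases List.mem_cons.mp hx with rfl | hxr
        · exact hcontE
        · exact c10 x hxr (pvGoodP_mono hins x hg)
    · -- e is carried over: the accumulator becomes (res, racc ++ [e])
      rw [List.foldl_cons, hstep]
      have hIH := ih res (racc ++ [e])
        (fun x hx => hpend x (List.mem_cons_of_mem _ hx))
        (by
          have : (racc ++ [e]).map Prod.fst ++ rest.map Prod.fst
              = racc.map Prod.fst ++ (e :: rest).map Prod.fst := by simp
          rw [this]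
          exact hnod)
        (by
          intro x hx
          rcases List.mem_append.mp hx with h | h
          · exact hfracc x h
          · simp only [List.mem_singleton] at h
            exact h ▸ hfe)
        (fun x hx => hfpend x (List.mem_cons_of_mem _ hx))
        hinv hndk
      obtain ⟨c1, c2, c3, c4, c5, c6, c7, c8, c9, c10, c11⟩ := hIH
      obtain ⟨rem', hrem'⟩ := c6
      refine ⟨c1, c2, c3, ?_, ?_, ⟨e :: rem', by simpa using hrem'⟩, ?_, ?_, ?_, ?_, c11⟩
      · intro x hx
        rcases c4 x hx with h | h
        · rcases List.mem_append.mp h with h' | h'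
          · exact Or.inl h'
          · simp only [List.mem_singleton] at h'
            exact Or.inr (h' ▸ List.mem_cons_self)
        · exact Or.inr (List.mem_cons_of_mem _ h)
      · refine c5.trans ?_
        have : (racc ++ [e]).map Prod.fst ++ rest.map Prod.fst
            = racc.map Prod.fst ++ (e :: rest).map Prod.fst := by simp
        rw [this]
      · have := c7
        simp only [List.length_append, List.length_singleton, List.length_cons, List.length_nil] at this ⊢
        omega
      · intro hlen
        have h8 := c8 (by
          simp only [List.length_append, List.length_singleton]
          simp only [List.length_cons] at hlen
          omega)
        exact ⟨h8.1, by rw [h8.2]; simp⟩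
      · intro x hx
        rcases List.mem_cons.mp hx with rfl | hxr
        · refine Or.inr ?_
          rw [hrem']
          exact List.mem_append.mpr (Or.inl (by simp))
        · exact c9 x hxr
      · intro x hx hg
        rcases List.mem_cons.mp hx with rfl | hxr
        · exact absurd hg hbad
        · exact c10 x hxr hg

-- the outer while-loop: sound, and resolves every name in every pvS stage
theorem pvLoop_spec (adj : PySem.Dict String String) (hnd : adj.keys.Nodup) :
    ∀ (fuel : Nat) (res : PySem.Dict String String) (pending : List (String × String)),
    pending.length < fuel →
    (∀ e ∈ pending, e ∈ adj.items) →
    ((pending.map Prod.fst).Nodup) →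
    (∀ e ∈ pending, res.contains e.1 = false) →
    pvInvD adj res →
    res.keys.Nodup →
    (∀ k ∈ adj.items.map Prod.fst, res.contains k = true ∨ k ∈ pending.map Prod.fst) →
    (pvInvD adj (pvLoop fuel res pending) ∧
     ∀ (j : Nat), ∀ k ∈ pvS adj.items j, (pvLoop fuel res pending).contains k = true) := by
  intro fuel
  induction fuel with
  | zero => intro res pending h; omega
  | succ fuel ih =>
    intro res pending hlt hpend hnodp hfp hinv hndk hcover
    rw [pvLoop]
    by_cases hemp : pending.isEmpty
    · rw [if_pos hemp]
      have hpe : pending = [] := List.isEmpty_iff.mp hemp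
      subst hpe
      refine ⟨hinv, ?_⟩
      intro j k hk
      rcases hcover k (pvS_subset_keys _ _ _ hk) with h | h
      · exact h
      · simp at h
    · rw [if_neg hemp]
      obtain ⟨c1, c2, c3, c4, c5, c6, c7, c8, c9, c10, c11⟩ :=
        pvRound_spec adj hnd pending res [] hpend (by simpa using hnodp)
          (by simp) hfp hinv hndk
      by_cases hnp : (pending.foldl pvRoundStep (res, [])).2.length = pending.length
      · rw [if_pos hnp]
        obtain ⟨hres, hremeq⟩ := c8 (by simpa using hnp)
        rw [hres]
        refine ⟨hinv, ?_⟩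
        -- fixpoint: nothing resolved in a full round, so every pvS stage is already in res
        intro j
        induction j with
        | zero => intro k hk; simp [pvS] at hk
        | succ j ihj =>
          intro k hk
          rw [pvS] at hk
          obtain ⟨x, hxf, hxk⟩ := List.mem_map.mp hk
          obtain ⟨hxi, hgood⟩ := List.mem_filter.mp hxf
          rcases hcover x.1 (List.mem_map.mpr ⟨x, hxi, rfl⟩) with hrc | hpc
          · exact hxk ▸ hrc
          · obtain ⟨y, hyp, hy1⟩ := List.mem_map.mp hpc
            have hyi : y ∈ adj.items := hpend y hyp
            have hx12 : (x.1, x.2) ∈ adj.items := by simpa using hxi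
            have hval : y.2 = x.2 := pvPairEq adj hnd (by simpa using hyi) (hy1 ▸ hx12)
            have hgp : pvGoodP res y := by
              rcases of_decide_eq_true hgood with hdg | ⟨hlen, h1, h2⟩
              · exact Or.inl (hval ▸ hdg)
              · refine Or.inr ⟨hval ▸ hlen, ?_, ?_⟩
                · rw [hval]; exact ihj _ h1
                · rw [hval]; exact ihj _ h2
            have := c10 y hyp hgp
            rw [hres] at this
            exact hxk ▸ hy1 ▸ this
      · rw [if_neg hnp]
        have hlen : (pending.foldl pvRoundStep (res, [])).2.length < pending.length := by
          have := c7
          simp only [List.length_nil, Nat.zero_add] at this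
          omega
        refine ih (pending.foldl pvRoundStep (res, [])).1 (pending.foldl pvRoundStep (res, [])).2
          (by omega)
          (fun x hx => by
            rcases c4 x hx with h | h
            · simp at h
            · exact hpend x h)
          (by
            refine List.Nodup.sublist ?_ hnodp
            simpa using c5)
          c11 c1 c2
          (fun k hkk => by
            rcases hcover k hkk with h | h
            · exact Or.inl (c3 k h)
            · obtain ⟨y, hyp, hy1⟩ := List.mem_map.mp h
              rcases c9 y hyp with hres | hrem
              · exact Or.inl (hy1 ▸ hres)
              · exact Or.inr (hy1 ▸ List.mem_map.mpr ⟨y, hrem, rfl⟩))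

-- ===== VERDICT (by name: the statement is the Claim_ definition above) =====
theorem build_equality_spec : Claim_equal_build_equality := by
  intro monkeys start variable_ id_value _ hpre
  obtain ⟨hnodup, _, hp0, hp1⟩ := hpre
  unfold Spec_build_equality build_equality build_equality_alt
  simp only []
  set adj := (PySem.Dict.mk monkeys).insert variable_ id_value with hadj
  have hndadj : adj.keys.Nodup := by
    apply PySem.Dict.nodup_keys_insert
    simpa [PySem.Dict.keys] using hnodup
  have hnditems : (adj.items.map Prod.fst).Nodup := by
    simpa [PySem.Dict.keys] using hndadj
  obtain ⟨hFinv, hFcomp⟩ := pvLoop_spec adj hndadj (adj.items.length + 1) PySem.Dict.empty adj.items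
    (by omega) (fun e he => he) hnditems (by simp [PySem.Dict.contains_empty])
    (by intro k w h; rw [PySem.Dict.get?_empty] at h; cases h)
    (by simpa using PySem.Dict.nodup_keys_empty (κ := String) (ν := String))
    (fun k hk => Or.inr hk)
  have resolve : ∀ p, p ∈ pvS adj.items adj.items.length →
      ∃ w, (match pvBuildExpr adj (adj.size + 1) p with
              | some e => PySem.Str.replace e id_value "x"
              | none => "") = PySem.Str.replace w id_value "x" ∧
        (pvLoop (adj.items.length + 1) PySem.Dict.empty adj.items).getD p "" = w := by
    intro p hp
    have hcont := hFcomp _ p hp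
    obtain ⟨w, hw⟩ := pvContains_of_get? hcont
    obtain ⟨j, hj⟩ := hFinv _ _ hw
    obtain ⟨wa, hwa⟩ := pvS_sound adj hndadj _ p hp
    have hsz : adj.size = adj.items.length := rfl
    have hA : pvBuildExpr adj (adj.size + 1) p = some wa := by
      rw [hsz]
      exact pvBuildExpr_mono adj hwa (by omega)
    have hweq : wa = w := pvBuildExpr_det adj hwa hj
    refine ⟨w, ?_, PySem.Dict.getD_of_get?_eq_some _ _ hw⟩
    rw [hA, hweq]
  obtain ⟨w0, hA0, hB0⟩ := resolve _ hp0
  obtain ⟨w1, hA1, hB1⟩ := resolve _ hp1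
  rw [hA0, hA1, hB0, hB1]
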